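-- pv_equiv track=rewrite | github.com/leiz2192/Python | exercise/three-distinct-factors/three-distinct-factors.py | isThreeDisctFactors
-- ===== SOURCE A (Python) =====
-- import math
--
-- def isThreeDisctFactors(n):
--     square_root = int(math.sqrt(n))
--     if square_root * square_root != n:
--         return False
--
--     if square_root <= 1:
--         return False
--
--     if square_root == 2:
--         return True
--
--     for i in range(2, int(math.sqrt(square_root)) + 1):
--         if square_root % i == 0:
--             return False
--
--     return True
-- ===== SOURCE B (Python) =====
-- import math
--
-- def isThreeDisctFactors(n):
--     root = int(math.sqrt(n))
--     count = 0
--     for d in range(1, root + 1):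
--         if n % d == 0:
--             count += 1 if d * d == n else 2
--     return count == 3
-- ===== Notes on version B (the rewrite author's own statement) =====
-- stated objective: alternative
-- what changed: B counts the divisors of n directly (one pass d=1..int(sqrt(n)), adding 1 for the square root and 2 for each divisor pair) and returns count==3, instead of A's perfect-square test followed by a trial-division primality check of the root.
import Mathlib
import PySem

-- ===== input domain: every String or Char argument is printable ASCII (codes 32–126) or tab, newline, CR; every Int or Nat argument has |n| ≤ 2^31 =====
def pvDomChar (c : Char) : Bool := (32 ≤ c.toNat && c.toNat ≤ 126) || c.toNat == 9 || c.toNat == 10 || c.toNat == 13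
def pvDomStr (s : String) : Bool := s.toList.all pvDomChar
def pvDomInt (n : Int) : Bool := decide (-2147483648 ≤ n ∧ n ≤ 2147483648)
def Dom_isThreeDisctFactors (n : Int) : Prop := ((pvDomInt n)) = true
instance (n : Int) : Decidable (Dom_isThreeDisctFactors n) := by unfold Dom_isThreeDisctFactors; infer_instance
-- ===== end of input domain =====

-- B re-implements the check as a direct divisor count (count == 3) instead of A's
-- perfect-square-then-trial-division-primality test; equal return values on 0 ≤ n.

-- ===== PORT A =====
-- int(math.sqrt(n)) is ported as Nat.sqrt n.toNat: exact for 0 ≤ n ≤ 2^31 (double sqrt is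
-- correctly rounded and the distance to the nearest square exceeds the rounding error there).
def isThreeDisctFactors (n : Int) : Bool :=
  let square_root : Int := (Nat.sqrt n.toNat : Int)
  if square_root * square_root != n then false
  else if square_root ≤ 1 then false
  else if square_root == 2 then true
  else if (PySem.List.pyRange 2 ((Nat.sqrt square_root.toNat : Int) + 1) 1).any
            (fun i => PySem.Int.mod square_root i == 0) then false
  else true

-- ===== PORT B =====
def isThreeDisctFactors_alt (n : Int) : Bool :=
  let root : Int := (Nat.sqrt n.toNat : Int)
  let count : Int := (PySem.List.pyRange 1 (root + 1) 1).foldl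
      (fun c d => if PySem.Int.mod n d == 0 then (if d * d == n then c + 1 else c + 2) else c) 0
  count == 3

-- ===== PRECONDITION & SPEC =====
-- Pre_ excludes n < 0, on which Python's math.sqrt raises ValueError (in both A and B).
def Pre_isThreeDisctFactors (n : Int) : Prop := 0 ≤ n
instance (n : Int) : Decidable (Pre_isThreeDisctFactors n) := by unfold Pre_isThreeDisctFactors; infer_instance
def pvWitness_isThreeDisctFactors : Int := (9)

def Spec_isThreeDisctFactors (n : Int) (out : Bool) : Prop := out = isThreeDisctFactors_alt n
instance (n : Int) (out : Bool) : Decidable (Spec_isThreeDisctFactors n out) := by unfold Spec_isThreeDisctFactors; infer_instance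

-- ===== CLAIM (what is proved, stated in full; the proofs are below) =====
def Claim_equal_isThreeDisctFactors : Prop := ∀ (n : Int), Dom_isThreeDisctFactors n → Pre_isThreeDisctFactors n → Spec_isThreeDisctFactors n (isThreeDisctFactors n)

-- ===== LEMMAS AND PROOFS =====

-- weight B's loop adds at divisor candidate d, in Nat
def pvW (m d : Nat) : Nat := if d ∣ m then (if d * d = m then 1 else 2) else 0

-- B's total count, in Nat
def pvS (m r : Nat) : Nat := ∑ d ∈ Finset.Icc 1 r, pvW m d

-- B's fold equals the Nat sum
theorem pv_fold_eq_sum (m r : Nat) :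
    ((PySem.List.pyRange 1 ((r : Int) + 1) 1).foldl
      (fun c d => if PySem.Int.mod (m : Int) d == 0 then (if d * d == (m : Int) then c + 1 else c + 2) else c) 0)
    = (pvS m r : Int) := by
  induction r with
  | zero =>
      rw [PySem.List.pyRange_one_eq_nil (by omega)]
      simp [pvS]
  | succ k ih =>
      have hsr : PySem.List.pyRange 1 (((k + 1 : Nat) : Int) + 1) 1
          = PySem.List.pyRange 1 ((k : Int) + 1) 1 ++ [((k : Int) + 1)] := by
        push_cast
        exact PySem.List.pyRange_one_succ_right (by omega)
      rw [hsr, List.foldl_append, ih]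
      simp only [List.foldl_cons, List.foldl_nil]
      have hS : pvS m (k + 1) = pvS m k + pvW m (k + 1) :=
        Finset.sum_Icc_succ_top (by omega) _
      have hmodIff : PySem.Int.mod (m : Int) ((k : Int) + 1) = 0 ↔ (k + 1) ∣ m := by
        rw [PySem.Int.mod_eq_zero_iff_dvd]
        norm_cast
      have hsqIff : ((k : Int) + 1) * ((k : Int) + 1) = (m : Int) ↔ (k + 1) * (k + 1) = m := by
        norm_cast
      by_cases hdv : (k + 1) ∣ m
      · have h0 : PySem.Int.mod (m : Int) ((k : Int) + 1) = 0 := hmodIff.mpr hdv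
        have hdvI : ((k : Int) + 1) ∣ (m : Int) := by exact_mod_cast hdv
        have hdvI2 : (1 + (k : Int)) ∣ (m : Int) := by rwa [add_comm]
        by_cases hsq : (k + 1) * (k + 1) = m
        · have h1 : ((k : Int) + 1) * ((k : Int) + 1) = (m : Int) := hsqIff.mpr hsq
          simp [h1, hS, pvW, hdv, hsq, hdvI]
        · have h1 : ((k : Int) + 1) * ((k : Int) + 1) ≠ (m : Int) := fun h => hsq (hsqIff.mp h)
          simp [h1, hS, pvW, hdv, hsq, hdvI]
      · have h0 : PySem.Int.mod (m : Int) ((k : Int) + 1) ≠ 0 := fun h => hdv (hmodIff.mp h)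
        have hdvI : ¬ ((k : Int) + 1) ∣ (m : Int) := by exact_mod_cast hdv
        have hdvI2 : ¬ (1 + (k : Int)) ∣ (m : Int) := by rwa [add_comm]
        simp [hS, pvW, hdv, hdvI]

-- no divisor strictly between 1 and r in r² iff r prime
theorem pv_no_mid_divisor_iff_prime (r : Nat) (hr : 2 ≤ r) :
    (∀ d, 2 ≤ d → d < r → ¬ d ∣ r * r) ↔ r.Prime := by
  constructor
  · intro h
    by_contra hnp
    obtain ⟨d, hd, h2, hlt⟩ := Nat.exists_dvd_of_not_prime2 hr hnp
    exact h d h2 hlt (hd.mul_right r)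
  · intro hp d h2 hlt hdvd
    obtain ⟨q, hq, hqd⟩ := Nat.exists_prime_and_dvd (by omega : d ≠ 1)
    have hqr : q ∣ r := by
      rcases (Nat.Prime.dvd_mul hq).mp (hqd.trans hdvd) with h | h <;> exact h
    have hqe : q = r := (Nat.prime_dvd_prime_iff_eq hq hp).mp hqr
    have : r ≤ d := Nat.le_of_dvd (by omega) (hqe ▸ hqd)
    omega

-- the count is 3 iff the root is prime, when m = r² with r ≥ 2
theorem pv_S_eq_three_iff (m r : Nat) (hm : r * r = m) (hr : 2 ≤ r) :
    (pvS m r = 3 ↔ r.Prime) := by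
  have hm4 : 4 ≤ m := by nlinarith
  have hIcc1 : Finset.Icc 1 r = insert 1 (Finset.Icc 2 r) := by
    ext x; simp only [Finset.mem_Icc, Finset.mem_insert]; omega
  have hIcc2 : Finset.Icc 2 r = insert r (Finset.Ico 2 r) := by
    ext x; simp only [Finset.mem_Icc, Finset.mem_insert, Finset.mem_Ico]; omega
  have h1notin : (1 : ℕ) ∉ Finset.Icc 2 r := by simp
  have hrnotin : r ∉ Finset.Ico 2 r := by simp
  have hw1 : pvW m 1 = 2 := by
    unfold pvW
    simp only [one_dvd, if_true, one_mul]
    rw [if_neg (by omega)]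
  have hwr : pvW m r = 1 := by
    have hdv : r ∣ m := ⟨r, hm.symm⟩
    simp [pvW, hdv, hm]
  have hSdec : pvS m r = 3 + ∑ d ∈ Finset.Ico 2 r, pvW m d := by
    unfold pvS
    rw [hIcc1, Finset.sum_insert h1notin, hIcc2, Finset.sum_insert hrnotin, hw1, hwr]
    ring
  have hT : (∑ d ∈ Finset.Ico 2 r, pvW m d = 0) ↔ ∀ d, 2 ≤ d → d < r → ¬ d ∣ m := by
    rw [Finset.sum_eq_zero_iff_of_nonneg (fun _ _ => Nat.zero_le _)]
    constructor
    · intro h d h2 hlt hdvd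
      have := h d (by simp [Finset.mem_Ico]; omega)
      have hne : d * d ≠ m := by nlinarith
      simp [pvW, hdvd, hne] at this
    · intro h d hd
      simp only [Finset.mem_Ico] at hd
      have := h d hd.1 hd.2
      simp [pvW, this]
  have hprime := pv_no_mid_divisor_iff_prime r hr
  rw [hSdec]
  constructor
  · intro h
    apply hprime.mp
    intro d h2 hl hdvd
    exact hT.mp (by omega) d h2 hl (by rwa [hm] at hdvd)
  · intro hp
    have h0 : ∑ d ∈ Finset.Ico 2 r, pvW m d = 0 :=
      hT.mpr (fun d h2 hl hdvd => hprime.mpr hp d h2 hl (by rwa [← hm] at hdvd))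
    omega

-- the count is never 3 when m is not a perfect square
theorem pv_S_even (m : Nat) (h : Nat.sqrt m * Nat.sqrt m ≠ m) : pvS m (Nat.sqrt m) ≠ 3 := by
  have he : 2 ∣ pvS m (Nat.sqrt m) := by
    refine Finset.dvd_sum ?_
    intro d hd
    simp only [Finset.mem_Icc] at hd
    have hne : d * d ≠ m := by
      intro hEq
      have hs : Nat.sqrt m = d := by rw [← hEq, Nat.sqrt_eq]
      rw [← hs] at hEq
      exact h hEq
    rcases Decidable.em (d ∣ m) with hdv | hdv
    · simp [pvW, hdv, hne]
    · simp [pvW, hdv]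
  omega

-- A's trial-division loop returns no hit iff r is prime (for 2 ≤ r)
theorem pv_any_false_iff (r : Nat) (hr : 2 ≤ r) :
    (((PySem.List.pyRange 2 ((Nat.sqrt r : Int) + 1) 1).any
        (fun i => PySem.Int.mod (r : Int) i == 0)) = false) ↔ r.Prime := by
  rw [List.any_eq_false]
  constructor
  · intro h
    rw [Nat.prime_def_le_sqrt]
    refine ⟨hr, ?_⟩
    intro j h2 hle hdvd
    have hmem : (j : Int) ∈ PySem.List.pyRange 2 ((Nat.sqrt r : Int) + 1) 1 := by
      rw [PySem.List.mem_pyRange_one]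
      constructor
      · exact_mod_cast h2
      · omega
    have hj := h _ hmem
    simp only [beq_iff_eq] at hj
    apply hj
    rw [PySem.Int.mod_eq_zero_iff_dvd]
    exact_mod_cast hdvd
  · intro hp i hmem
    rw [PySem.List.mem_pyRange_one] at hmem
    obtain ⟨h2, hlt⟩ := hmem
    lift i to ℕ using (by omega) with j
    simp only [beq_iff_eq, PySem.Int.mod_eq_zero_iff_dvd]
    intro hdvd
    have hdn : j ∣ r := by exact_mod_cast hdvd
    exact (Nat.prime_def_le_sqrt.mp hp).2 j (by exact_mod_cast h2)
      (by omega) hdn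

-- degenerate roots: the count stays below three
theorem pv_S_small (m r : Nat) (hm : r * r = m) (hr : r ≤ 1) : pvS m r ≠ 3 := by
  interval_cases r
  · subst hm; decide
  · subst hm; decide

-- main equivalence
theorem pv_main (n : Int) (hpre : 0 ≤ n) : isThreeDisctFactors n = isThreeDisctFactors_alt n := by
  obtain ⟨m, rfl⟩ : ∃ m : ℕ, n = (m : Int) := ⟨n.toNat, (Int.toNat_of_nonneg hpre).symm⟩
  have e1 : ((Nat.sqrt m : Int) * (Nat.sqrt m : Int) = (m : Int)) ↔ Nat.sqrt m * Nat.sqrt m = m := by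
    exact_mod_cast Iff.rfl
  have e2 : ((Nat.sqrt m : Int) ≤ 1) ↔ Nat.sqrt m ≤ 1 := by exact_mod_cast Iff.rfl
  have e3 : ((Nat.sqrt m : Int) = 2) ↔ Nat.sqrt m = 2 := by exact_mod_cast Iff.rfl
  unfold isThreeDisctFactors isThreeDisctFactors_alt
  simp only [Int.toNat_natCast]
  rw [pv_fold_eq_sum m (Nat.sqrt m)]
  simp only [bne_iff_ne, ne_eq, beq_iff_eq, e1, e2, e3]
  by_cases hsq : Nat.sqrt m * Nat.sqrt m = m
  · rw [if_neg (not_not_intro hsq)]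
    by_cases hr1 : Nat.sqrt m ≤ 1
    · rw [if_pos hr1]
      have hB := pv_S_small m (Nat.sqrt m) hsq hr1
      symm
      simp only [beq_eq_false_iff_ne, ne_eq]
      exact_mod_cast hB
    · rw [if_neg hr1]
      have hr2 : 2 ≤ Nat.sqrt m := by omega
      have hiff := pv_S_eq_three_iff m (Nat.sqrt m) hsq hr2
      by_cases hr2' : Nat.sqrt m = 2
      · rw [if_pos hr2']
        have hB3 : pvS m (Nat.sqrt m) = 3 := hiff.mpr (hr2' ▸ Nat.prime_two)
        symm
        simp only [beq_iff_eq]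
        exact_mod_cast hB3
      · rw [if_neg hr2']
        by_cases hp : (Nat.sqrt m).Prime
        · rw [if_neg (by simp [(pv_any_false_iff (Nat.sqrt m) hr2).mpr hp])]
          have hB3 : pvS m (Nat.sqrt m) = 3 := hiff.mpr hp
          symm
          simp only [beq_iff_eq]
          exact_mod_cast hB3
        · have hA : ((PySem.List.pyRange 2 ((Nat.sqrt (Nat.sqrt m) : Int) + 1) 1).any
              (fun i => PySem.Int.mod ((Nat.sqrt m : ℕ) : Int) i == 0)) = true := by
            rcases Bool.eq_false_or_eq_true ((PySem.List.pyRange 2 ((Nat.sqrt (Nat.sqrt m) : Int) + 1) 1).any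
              (fun i => PySem.Int.mod ((Nat.sqrt m : ℕ) : Int) i == 0)) with h | h
            · exact h
            · exact absurd ((pv_any_false_iff (Nat.sqrt m) hr2).mp h) hp
          rw [if_pos hA]
          have hB : pvS m (Nat.sqrt m) ≠ 3 := fun h => hp (hiff.mp h)
          symm
          simp only [beq_eq_false_iff_ne, ne_eq]
          exact_mod_cast hB
  · rw [if_pos hsq]
    have hB := pv_S_even m hsq
    symm
    simp only [beq_eq_false_iff_ne, ne_eq]
    exact_mod_cast hB

-- ===== VERDICT (by name: the statement is the Claim_ definition above) =====
theorem isThreeDisctFactors_spec : Claim_equal_isThreeDisctFactors := by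
  intro n _ hpre
  unfold Spec_isThreeDisctFactors
  exact pv_main n hpre
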